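-- pv_equiv track=rewrite | github.com/manhtv/EthIR | ethir/pattern.py | check_string_pattern
-- ===== SOURCE A (Python) =====
-- pattern = ["JUMPDEST","PUSH1 0x00","DUP1","SLOAD","PUSH1 0x01","DUP2","PUSH1 0x01","AND","ISZERO","PUSH2 0x0100","MUL","SUB","AND","PUSH1 0x02","SWAP1","DIV","DUP1","PUSH1 0x1f","ADD","PUSH1 0x20","DUP1","SWAP2","DIV","MUL","PUSH1 0x20","ADD","PUSH1 0x40","MLOAD","SWAP1","DUP2","ADD","PUSH1 0x40","MSTORE","DUP1","SWAP3","SWAP2","SWAP1","DUP2","DUP2","MSTORE","PUSH1 0x20","ADD","DUP3","DUP1","SLOAD","PUSH1 0x01","DUP2","PUSH1 0x01","AND","ISZERO","PUSH2 0x0100","MUL","SUB","AND","PUSH1 0x02","SWAP1","DIV","DUP1","ISZERO"]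
--
-- def check_string_pattern(instructions):
--     pat = False
--     if instructions[0] == pattern[0]:
--         i = 1
--         correct = True
--         while(i<len(instructions) and instructions[i]!="DUP1"):
--             if instructions[i].split()[0][:-1]!="PUSH":
--                 correct = False
--             i = i+1
--         if correct:
--             pat = instructions[i:] == pattern[2:]
--     return pat
-- ===== SOURCE B (Python) =====
-- pattern = ["JUMPDEST","PUSH1 0x00","DUP1","SLOAD","PUSH1 0x01","DUP2","PUSH1 0x01","AND","ISZERO","PUSH2 0x0100","MUL","SUB","AND","PUSH1 0x02","SWAP1","DIV","DUP1","PUSH1 0x1f","ADD","PUSH1 0x20","DUP1","SWAP2","DIV","MUL","PUSH1 0x20","ADD","PUSH1 0x40","MLOAD","SWAP1","DUP2","ADD","PUSH1 0x40","MSTORE","DUP1","SWAP3","SWAP2","SWAP1","DUP2","DUP2","MSTORE","PUSH1 0x20","ADD","DUP3","DUP1","SLOAD","PUSH1 0x01","DUP2","PUSH1 0x01","AND","ISZERO","PUSH2 0x0100","MUL","SUB","AND","PUSH1 0x02","SWAP1","DIV","DUP1","ISZERO"]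
--
-- def check_string_pattern(instructions):
--     # No search for 'DUP1' at all: the fixed 57-element tail pattern[2:] can only
--     # match as the FINAL 57 elements (a valid prefix consists of PUSH* tokens,
--     # and a PUSH* token is never 'DUP1'), so the boundary m is pure arithmetic.
--     m = len(instructions) - 57
--     if m < 1 or instructions[0] != pattern[0]:
--         return False
--     if instructions[m:] != pattern[2:]:
--         return False
--     return all(t.split()[0][:-1] == "PUSH" for t in instructions[1:m])
-- ===== Notes on version B (the rewrite author's own statement) =====
-- stated objective: alternative
-- what changed: B never searches for the 'DUP1' marker: because the 57-element tail pattern[2:] can only match as the final 57 elements (valid prefix tokens are PUSH*, never 'DUP1'), B fixes the boundary m = len-57 by pure length arithmetic, compares the suffix slice instructions[m:] to pattern[2:], and only then validates the middle slice, instead of A's scan-to-marker loop threading a flag.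
import Mathlib
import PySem

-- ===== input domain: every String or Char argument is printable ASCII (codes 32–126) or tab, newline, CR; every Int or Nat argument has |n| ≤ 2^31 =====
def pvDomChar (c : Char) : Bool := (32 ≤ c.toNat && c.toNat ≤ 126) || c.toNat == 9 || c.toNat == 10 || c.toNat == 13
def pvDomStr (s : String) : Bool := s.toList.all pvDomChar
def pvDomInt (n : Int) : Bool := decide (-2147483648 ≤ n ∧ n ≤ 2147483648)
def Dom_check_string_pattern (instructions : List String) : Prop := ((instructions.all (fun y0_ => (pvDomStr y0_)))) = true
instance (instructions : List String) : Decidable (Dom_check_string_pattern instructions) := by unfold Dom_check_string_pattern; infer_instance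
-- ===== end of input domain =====

-- B performs no search for the 'DUP1' marker: the 57-element tail pattern[2:] can only match
-- as the final 57 elements, so B fixes the boundary by length arithmetic, compares the
-- suffix slice, and validates the middle slice (objective: alternative).

-- module constant `pattern`
def patternList : List String := ["JUMPDEST","PUSH1 0x00","DUP1","SLOAD","PUSH1 0x01","DUP2","PUSH1 0x01","AND","ISZERO","PUSH2 0x0100","MUL","SUB","AND","PUSH1 0x02","SWAP1","DIV","DUP1","PUSH1 0x1f","ADD","PUSH1 0x20","DUP1","SWAP2","DIV","MUL","PUSH1 0x20","ADD","PUSH1 0x40","MLOAD","SWAP1","DUP2","ADD","PUSH1 0x40","MSTORE","DUP1","SWAP3","SWAP2","SWAP1","DUP2","DUP2","MSTORE","PUSH1 0x20","ADD","DUP3","DUP1","SLOAD","PUSH1 0x01","DUP2","PUSH1 0x01","AND","ISZERO","PUSH2 0x0100","MUL","SUB","AND","PUSH1 0x02","SWAP1","DIV","DUP1","ISZERO"]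

-- ===== PORT A =====
-- A's while loop: walks the remaining suffix (= instructions[i:]), threading `correct`;
-- returns (instructions[i:] at exit, correct).  `t.split()[0][:-1]` — Python raises IndexError
-- when t.split() is empty; that input is excluded by Pre_, here the [0] defaults to "".
def cspLoopA : List String → Bool → List String × Bool
  | [], correct => ([], correct)
  | t :: rest, correct =>
      if t ≠ "DUP1" then
        cspLoopA rest
          (if PySem.Str.slice ((PySem.Str.split₀ t).getD 0 "") none (some (-1)) ≠ "PUSH"
           then false else correct)
      else (t :: rest, correct)

def check_string_pattern (instructions : List String) : Bool :=
  match instructions with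
  | [] => false   -- instructions[0] raises IndexError: excluded by Pre_
  | h :: rest =>
    if h = patternList.headI then
      let sc := cspLoopA rest true     -- i = 1; while i<len and instructions[i] != "DUP1": …
      if sc.2 then sc.1 == patternList.drop 2 else false   -- pat = instructions[i:] == pattern[2:]
    else false

-- ===== PORT B =====
-- Source B: m = len(instructions) - 57; boundary by arithmetic, then suffix compare, then
-- middle validation.  Python reads instructions[0] only after `m < 1` fails (the `or`
-- short-circuits), so the list is nonempty there: headI is exact.
def check_string_pattern_alt (instructions : List String) : Bool :=
  let m : Int := (instructions.length : Int) - 57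
  if m < 1 then false
  else if instructions.headI ≠ patternList.headI then false
  else if PySem.List.slice instructions (some m) none ≠ patternList.drop 2 then false
  else (PySem.List.slice instructions (some 1) (some m)).all
        (fun t => PySem.Str.slice ((PySem.Str.split₀ t).getD 0 "") none (some (-1)) == "PUSH")

-- ===== PRECONDITION & SPEC =====
-- Pre_ excludes exactly the inputs where Python A raises IndexError: the empty list
-- (instructions[0]), and — when the loop runs (head = "JUMPDEST") — a whitespace-only
-- instruction before the first "DUP1", on which `t.split()[0]` raises.
def Pre_check_string_pattern (instructions : List String) : Prop :=
  instructions ≠ [] ∧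
  (instructions.headI = "JUMPDEST" →
    ∀ t ∈ (instructions.tail).takeWhile (· ≠ "DUP1"), PySem.Str.split₀ t ≠ [])
instance (instructions : List String) : Decidable (Pre_check_string_pattern instructions) := by
  unfold Pre_check_string_pattern; infer_instance

def pvWitness_check_string_pattern : List String := ["JUMPDEST", "PUSH1 0x00", "DUP1", "SLOAD"]

def Spec_check_string_pattern (instructions : List String) (out : Bool) : Prop := out = check_string_pattern_alt instructions
instance (instructions : List String) (out : Bool) : Decidable (Spec_check_string_pattern instructions out) := by unfold Spec_check_string_pattern; infer_instance

-- ===== CLAIM (what is proved, stated in full; the proofs are below) =====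
def Claim_equal_check_string_pattern : Prop := ∀ (instructions : List String), Dom_check_string_pattern instructions → Pre_check_string_pattern instructions → Spec_check_string_pattern instructions (check_string_pattern instructions)

-- ===== LEMMAS AND PROOFS =====

-- the token test both Pythons apply to a prefix instruction
def tokOK (t : String) : Bool :=
  PySem.Str.slice ((PySem.Str.split₀ t).getD 0 "") none (some (-1)) == "PUSH"

-- a token passing the PUSH test is never "DUP1"
lemma tokOK_ne_dup1 (t : String) (h : tokOK t = true) : (t != "DUP1") = true := by
  rcases eq_or_ne t "DUP1" with rfl | hne
  · exact absurd h (by decide)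
  · simpa using hne

-- A's loop, characterised by the length p of the DUP1-free prefix
lemma cspLoopA_eq (l : List String) (c : Bool) :
    cspLoopA l c =
      (l.drop ((l.takeWhile (fun t => t != "DUP1")).length),
       c && (l.take ((l.takeWhile (fun t => t != "DUP1")).length)).all tokOK) := by
  induction l generalizing c with
  | nil => simp [cspLoopA]
  | cons t rest ih =>
    by_cases ht : t = "DUP1"
    · subst ht
      simp [cspLoopA]
    · have hP : (t != "DUP1") = true := by simpa using ht
      simp only [cspLoopA, if_pos ht, List.takeWhile_cons, hP, if_true, List.length_cons,
        List.drop_succ_cons, List.take_succ_cons, List.all_cons]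
      rw [ih]
      by_cases hs : PySem.Str.slice ((PySem.Str.split₀ t).getD 0 "") none (some (-1)) = "PUSH"
      · have htok : tokOK t = true := by simp only [tokOK, beq_iff_eq]; exact hs
        rw [if_neg (not_not_intro hs)]
        simp [htok]
      · have htok : tokOK t = false := by simp only [tokOK, beq_eq_false_iff_ne, ne_eq]; exact hs
        rw [if_pos hs]
        simp [htok]

-- takeWhile of a splice: all of l1 pass, head of l2 fails
lemma takeWhile_splice_len (l1 l2 : List String)
    (h1 : ∀ t ∈ l1, (t != "DUP1") = true) (h2 : l2.headI = "DUP1") (hne : l2 ≠ []) :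
    ((l1 ++ l2).takeWhile (fun t => t != "DUP1")).length = l1.length := by
  induction l1 with
  | nil =>
    cases l2 with
    | nil => exact absurd rfl hne
    | cons a tl =>
      simp only [List.headI] at h2
      subst h2
      simp
  | cons t tl ih =>
    have hPt := h1 t (by simp)
    simp only [List.cons_append, List.takeWhile_cons, hPt, if_true, List.length_cons]
    rw [ih (fun x hx => h1 x (by simp [hx]))]

-- ===== VERDICT (by name: the statement is the Claim_ definition above) =====
theorem check_string_pattern_spec : Claim_equal_check_string_pattern := by
  intro instructions _ _
  unfold Spec_check_string_pattern
  cases instructions with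
  | nil => rfl
  | cons h rest =>
    have hBdef : check_string_pattern_alt (h :: rest) =
        (if (((h :: rest).length : Int) - 57) < 1 then false
         else if (h :: rest).headI ≠ patternList.headI then false
         else if PySem.List.slice (h :: rest) (some (((h :: rest).length : Int) - 57)) none ≠ patternList.drop 2 then false
         else (PySem.List.slice (h :: rest) (some 1) (some (((h :: rest).length : Int) - 57))).all tokOK) := rfl
    have hAdef : check_string_pattern (h :: rest) =
        (if h = patternList.headI then
           (if (cspLoopA rest true).2 then (cspLoopA rest true).1 == patternList.drop 2 else false)
         else false) := rfl
    have hc : (((h :: rest).length : Int) - 57) = ((rest.length : Int) + 1 - 57) := by simp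
    rw [hAdef, hBdef, hc]
    by_cases hh : h = patternList.headI
    · subst hh
      rw [if_pos rfl, if_neg (show ¬ ((patternList.headI :: rest).headI ≠ patternList.headI) from not_not_intro rfl)]
      rw [cspLoopA_eq]
      set p := (rest.takeWhile (fun t => t != "DUP1")).length with hp
      simp only [Bool.true_and]
      have h57 : (patternList.drop 2).length = 57 := by decide
      by_cases hm : ((rest.length : Int) + 1 - 57) < 1
      · -- short list: B is false; A compares drop p with the 57-long tail, which cannot match
        rw [if_pos hm]
        have hne : (rest.drop p == patternList.drop 2) = false := by
          cases h0 : (rest.drop p == patternList.drop 2) with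
          | false => rfl
          | true =>
            exfalso
            have hdp : rest.drop p = patternList.drop 2 := by simpa using h0
            have := congrArg List.length hdp
            simp only [List.length_drop, h57] at this
            omega
        rw [hne]
        cases hall : (rest.take p).all tokOK <;> simp
      · rw [if_neg hm]
        have hn : 57 ≤ rest.length := by omega
        set q : Nat := rest.length - 57 with hq
        have hmq : ((rest.length : Int) + 1 - 57) = ((q + 1 : Nat) : Int) := by
          push_cast; omega
        rw [hmq]
        have hmid : PySem.List.slice (patternList.headI :: rest) (some 1) (some ((q + 1 : Nat) : Int))
            = rest.take q := by
          rw [show ((1:Int)) = ((1:Nat):Int) by norm_num, PySem.List.slice_natCast]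
          simp
        rw [hmid]
        -- facts used when the suffix comparison decides: drop p = tail forces p = q
        have keyPQ : ∀ (hdp : rest.drop p = patternList.drop 2), p = q := by
          intro hdp
          have hplen : p ≤ rest.length := by
            by_contra hgt
            have : rest.drop p = [] := List.drop_eq_nil_of_le (by omega)
            rw [hdp] at this
            exact absurd this (by decide)
          have := congrArg List.length hdp
          simp only [List.length_drop, h57] at this
          omega
        by_cases hsuf : PySem.List.slice (patternList.headI :: rest) (some ((q + 1 : Nat) : Int)) none ≠ patternList.drop 2
        · -- suffix mismatch: B false; A's comparison fails too
          rw [if_pos hsuf]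
          have hds : rest.drop q ≠ patternList.drop 2 := by
            intro hcon
            apply hsuf
            rw [PySem.List.slice_from_natCast]
            simpa using hcon
          cases hall : (rest.take p).all tokOK with
          | false => rfl
          | true =>
            simp only [if_true]
            cases h0 : (rest.drop p == patternList.drop 2) with
            | false => rfl
            | true =>
              exfalso
              have hdp : rest.drop p = patternList.drop 2 := by simpa using h0
              exact hds ((keyPQ hdp) ▸ hdp)
        · -- suffix matches at the arithmetic boundary
          rw [if_neg hsuf]
          rw [ne_eq, not_not] at hsuf
          rw [PySem.List.slice_from_natCast] at hsuf
          simp only [List.drop_succ_cons] at hsuf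
          cases hq2 : (rest.take q).all tokOK with
          | false =>
            -- some middle token is not PUSH-like: show A false
            cases hall : (rest.take p).all tokOK with
            | false => rfl
            | true =>
              simp only [if_true]
              cases h0 : (rest.drop p == patternList.drop 2) with
              | false => rfl
              | true =>
                exfalso
                have hdp : rest.drop p = patternList.drop 2 := by simpa using h0
                rw [keyPQ hdp, hq2] at hall
                exact absurd hall (by simp)
          | true =>
            -- middle all PUSH-like: then p = q and A agrees with B
            have hpq : p = q := by
              have hsplit : rest = rest.take q ++ rest.drop q := (List.take_append_drop q rest).symm
              have hhead : (rest.drop q).headI = "DUP1" := by rw [hsuf]; decide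
              have hne2 : rest.drop q ≠ [] := by rw [hsuf]; decide
              have hlenTW := takeWhile_splice_len (rest.take q) (rest.drop q)
                (fun t ht => tokOK_ne_dup1 t (List.all_eq_true.mp hq2 t ht)) hhead hne2
              rw [← hsplit] at hlenTW
              rw [hp, hlenTW, List.length_take]
              omega
            rw [hpq, hq2]
            simp only [if_true]
            simp [hsuf]
    · rw [if_neg hh]
      by_cases hm : ((rest.length : Int) + 1 - 57) < 1
      · rw [if_pos hm]
      · rw [if_neg hm, if_pos (by simpa using hh)]
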